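-- pv_equiv track=rewrite | github.com/hyunjun1121/codetree-TILs | 240708/문자에 따른 명령/text-based-commands.py | different_positions
-- ===== SOURCE A (Python) =====
-- def calculate_positions(commands):
--     # Initialize position and direction (facing North)
--     x, y, direction = 0, 0, 0
--     n = len(commands)
--
--     # Direction vectors (North, East, South, West)
--     dx = [0, 1, 0, -1]
--     dy = [1, 0, -1, 0]
--
--     # Prefix positions and directions
--     prefix_positions = [(x, y, direction)]
--
--     for command in commands:
--         if command == 'L':
--             direction = (direction - 1) % 4
--         elif command == 'R':
--             direction = (direction + 1) % 4
--         elif command == 'F':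
--             x += dx[direction]
--             y += dy[direction]
--         prefix_positions.append((x, y, direction))
--
--     return prefix_positions
--
-- def different_positions(command_string):
--     n = len(command_string)
--
--     # Compute prefix positions
--     prefix_positions = calculate_positions(command_string)
--
--     # Initialize the set of unique positions
--     unique_positions = set()
--
--     # Direction vectors (North, East, South, West)
--     dx = [0, 1, 0, -1]
--     dy = [1, 0, -1, 0]
--
--     # Simulate correcting each command
--     for i in range(n):
--         for new_command in ['L', 'R', 'F']:
--             if command_string[i] != new_command:
--                 # Get the state before the modified command
--                 x, y, direction = prefix_positions[i]
--
--                 # Apply the modified command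
--                 if new_command == 'L':
--                     direction = (direction - 1) % 4
--                 elif new_command == 'R':
--                     direction = (direction + 1) % 4
--                 elif new_command == 'F':
--                     x += dx[direction]
--                     y += dy[direction]
--
--                 # Continue with the rest of the commands
--                 for j in range(i + 1, n):
--                     command = command_string[j]
--                     if command == 'L':
--                         direction = (direction - 1) % 4
--                     elif command == 'R':
--                         direction = (direction + 1) % 4
--                     elif command == 'F':
--                         x += dx[direction]
--                         y += dy[direction]
--
--                 # Store the resulting position
--                 unique_positions.add((x, y))
--
--     return len(unique_positions)
-- ===== SOURCE B (Python) =====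
-- def different_positions(command_string):
--     # O(n): backward pass of suffix displacement vectors (in the entering frame),
--     # then a single forward pass trying each altered command in O(1).
--     n = len(command_string)
--     # v[i] = net displacement of commands i..n-1 assuming entering direction North;
--     # entering with direction d, the actual displacement is v[i] rotated d times clockwise.
--     v = [(0, 0)] * (n + 1)
--     for i in range(n - 1, -1, -1):
--         wx, wy = v[i + 1]
--         c = command_string[i]
--         if c == 'L':
--             v[i] = (-wy, wx)
--         elif c == 'R':
--             v[i] = (wy, -wx)
--         elif c == 'F':
--             v[i] = (wx, wy + 1)
--         else:
--             v[i] = (wx, wy)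
--     results = set()
--     x, y, d = 0, 0, 0
--     for i in range(n):
--         c = command_string[i]
--         for nc in ('L', 'R', 'F'):
--             if c != nc:
--                 if nc == 'L':
--                     nx, ny, nd = x, y, (d - 1) % 4
--                 elif nc == 'R':
--                     nx, ny, nd = x, y, (d + 1) % 4
--                 else:
--                     mx, my = _rot((0, 1), d)
--                     nx, ny, nd = x + mx, y + my, d
--                 fx, fy = _rot(v[i + 1], nd)
--                 results.add((nx + fx, ny + fy))
--         # advance the real state past command i
--         if c == 'L':
--             d = (d - 1) % 4
--         elif c == 'R':
--             d = (d + 1) % 4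
--         elif c == 'F':
--             mx, my = _rot((0, 1), d)
--             x, y = x + mx, y + my
--     return len(results)
--
-- def _rot(p, d):
--     # rotate p by d quarter-turns clockwise (North->East)
--     px, py = p
--     d %= 4
--     if d == 0:
--         return (px, py)
--     if d == 1:
--         return (py, -px)
--     if d == 2:
--         return (-px, -py)
--     return (-py, px)
-- ===== Notes on version B (the rewrite author's own statement) =====
-- stated objective: faster
-- what changed: Instead of re-simulating the whole remaining command suffix for every altered command (quadratic), B makes one backward pass computing each suffix's net displacement vector in the entering frame, then a single forward pass applies each altered command and the rotated suffix vector in O(1).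
import Mathlib
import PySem

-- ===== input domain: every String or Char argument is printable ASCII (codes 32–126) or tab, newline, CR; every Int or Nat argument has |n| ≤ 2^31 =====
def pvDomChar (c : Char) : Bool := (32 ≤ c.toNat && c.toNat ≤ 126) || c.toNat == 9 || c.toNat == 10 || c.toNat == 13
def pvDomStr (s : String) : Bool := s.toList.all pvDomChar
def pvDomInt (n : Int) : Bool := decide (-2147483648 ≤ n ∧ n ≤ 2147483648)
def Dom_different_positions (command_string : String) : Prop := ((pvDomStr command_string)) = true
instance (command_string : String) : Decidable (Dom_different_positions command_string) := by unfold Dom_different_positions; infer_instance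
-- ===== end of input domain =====

-- B replaces A's quadratic per-index resimulation by one backward pass of suffix
-- displacement vectors applied in O(1) per altered command (objective: faster, asymptotic).


-- ===== PORT A =====
-- one step of A's command interpreter (the if/elif chain A repeats three times);
-- the list indices dx[direction]/dy[direction] use pyGetD: direction is always 0..3, in range.
def pvStepA (s : Int × Int × Int) (c : Char) : Int × Int × Int :=
  if c = 'L' then (s.1, s.2.1, PySem.Int.mod (s.2.2 - 1) 4)
  else if c = 'R' then (s.1, s.2.1, PySem.Int.mod (s.2.2 + 1) 4)
  else if c = 'F' then
    (s.1 + PySem.List.pyGetD [0, 1, 0, -1] s.2.2 0,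
     s.2.1 + PySem.List.pyGetD [1, 0, -1, 0] s.2.2 0, s.2.2)
  else s

def calculate_positions (commands : String) : List (Int × Int × Int) :=
  (commands.toList.foldl
    (fun (st : (Int × Int × Int) × List (Int × Int × Int)) c =>
      let s' := pvStepA st.1 c
      (s', st.2 ++ [s']))
    ((0, 0, 0), [(0, 0, 0)])).2

def different_positions (command_string : String) : Int :=
  let cs := command_string.toList
  let n : Int := cs.length
  let prefixPositions := calculate_positions command_string
  let u : PySem.Set (Int × Int) :=
    (PySem.List.pyRange 0 n 1).foldl (fun u i =>
      (['L', 'R', 'F'] : List Char).foldl (fun u nc =>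
        if PySem.List.pyGetD cs i ' ' ≠ nc then
          let st := PySem.List.pyGetD prefixPositions i (0, 0, 0)
          let st1 := pvStepA st nc    -- A's inline application of the modified command
          let st2 := (PySem.List.pyRange (i + 1) n 1).foldl
            (fun st j => pvStepA st (PySem.List.pyGetD cs j ' ')) st1
          PySem.Set.add u (st2.1, st2.2.1)
        else u) u) PySem.Set.empty
  PySem.Set.len u

-- ===== PORT B =====
-- _rot from Source B: rotate a vector by d quarter-turns clockwise
def pvRot (p : Int × Int) (d : Int) : Int × Int :=
  let m := PySem.Int.mod d 4
  if m = 0 then p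
  else if m = 1 then (p.2, -p.1)
  else if m = 2 then (-p.1, -p.2)
  else (-p.2, p.1)

-- Source B's backward pass: the suffix displacement list v (v[i] for suffix i..n-1)
def pvSuffix : List Char → List (Int × Int)
  | [] => [(0, 0)]
  | c :: cs =>
    let rest := pvSuffix cs
    let w := rest.headD (0, 0)
    (if c = 'L' then (-w.2, w.1)
     else if c = 'R' then (w.2, -w.1)
     else if c = 'F' then (w.1, w.2 + 1)
     else w) :: rest

-- Source B's per-alternative state (nx, ny, nd)
def pvAltB (st : Int × Int × Int) (nc : Char) : Int × Int × Int :=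
  if nc = 'L' then (st.1, st.2.1, PySem.Int.mod (st.2.2 - 1) 4)
  else if nc = 'R' then (st.1, st.2.1, PySem.Int.mod (st.2.2 + 1) 4)
  else
    let m := pvRot (0, 1) st.2.2
    (st.1 + m.1, st.2.1 + m.2, st.2.2)

-- Source B's advance of the real state past command c
def pvAdvB (st : Int × Int × Int) (c : Char) : Int × Int × Int :=
  if c = 'L' then (st.1, st.2.1, PySem.Int.mod (st.2.2 - 1) 4)
  else if c = 'R' then (st.1, st.2.1, PySem.Int.mod (st.2.2 + 1) 4)
  else if c = 'F' then
    let m := pvRot (0, 1) st.2.2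
    (st.1 + m.1, st.2.1 + m.2, st.2.2)
  else st

-- Source B's forward loop: commands synced with the tail of the suffix-vector list
def pvLoopB : List Char → List (Int × Int) → Int × Int × Int →
    PySem.Set (Int × Int) → PySem.Set (Int × Int)
  | c :: cs, _ :: vs, st, u =>
    let w := vs.headD (0, 0)
    let u' := (['L', 'R', 'F'] : List Char).foldl (fun u nc =>
      if c ≠ nc then
        let a := pvAltB st nc
        let f := pvRot w a.2.2
        PySem.Set.add u (a.1 + f.1, a.2.1 + f.2)
      else u) u
    pvLoopB cs vs (pvAdvB st c) u'
  | _, _, _, u => u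

def different_positions_alt (command_string : String) : Int :=
  let cs := command_string.toList
  PySem.Set.len (pvLoopB cs (pvSuffix cs) (0, 0, 0) PySem.Set.empty)

-- ===== PRECONDITION & SPEC =====
def Spec_different_positions (command_string : String) (out : Int) : Prop := out = different_positions_alt command_string
instance (command_string : String) (out : Int) : Decidable (Spec_different_positions command_string out) := by unfold Spec_different_positions; infer_instance

-- ===== CLAIM (what is proved, stated in full; the proofs are below) =====
def Claim_equal_different_positions : Prop := ∀ (command_string : String), Dom_different_positions command_string → Spec_different_positions command_string (different_positions command_string)

-- ===== LEMMAS AND PROOFS =====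

-- head of the suffix-vector list: the net displacement of cs entered facing North
def pvV (cs : List Char) : Int × Int := (pvSuffix cs).headD (0, 0)


-- literal values of mod 4 used by the rotation case analyses
lemma pvMod4_m1 : PySem.Int.mod (-1) 4 = 3 := by decide
lemma pvMod4_0 : PySem.Int.mod 0 4 = 0 := by decide
lemma pvMod4_1 : PySem.Int.mod 1 4 = 1 := by decide
lemma pvMod4_2 : PySem.Int.mod 2 4 = 2 := by decide
lemma pvMod4_3 : PySem.Int.mod 3 4 = 3 := by decide
lemma pvMod4_4 : PySem.Int.mod 4 4 = 0 := by decide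

-- rotation algebra, by the four cases of d
lemma pvRot_L (w : Int × Int) (d : Int) (h0 : 0 ≤ d) (h4 : d < 4) :
    pvRot w (PySem.Int.mod (d - 1) 4) = pvRot (-w.2, w.1) d := by
  interval_cases d <;> norm_num [pvRot, pvMod4_m1, pvMod4_0, pvMod4_1, pvMod4_2, pvMod4_3, pvMod4_4]

lemma pvRot_R (w : Int × Int) (d : Int) (h0 : 0 ≤ d) (h4 : d < 4) :
    pvRot w (PySem.Int.mod (d + 1) 4) = pvRot (w.2, -w.1) d := by
  interval_cases d <;> norm_num [pvRot, pvMod4_m1, pvMod4_0, pvMod4_1, pvMod4_2, pvMod4_3, pvMod4_4]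

lemma pvRot_F (w : Int × Int) (d : Int) (h0 : 0 ≤ d) (h4 : d < 4) :
    pvRot (w.1, w.2 + 1) d
      = ((pvRot (0, 1) d).1 + (pvRot w d).1, (pvRot (0, 1) d).2 + (pvRot w d).2) := by
  interval_cases d <;>
    norm_num [pvRot, pvMod4_m1, pvMod4_0, pvMod4_1, pvMod4_2, pvMod4_3, pvMod4_4] <;> omega

-- A's dx/dy table lookups agree with B's rotation of (0,1)
lemma pvMove_eq (d : Int) (h0 : 0 ≤ d) (h4 : d < 4) :
    PySem.List.pyGetD ([0, 1, 0, -1] : List Int) d 0 = (pvRot (0, 1) d).1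
      ∧ PySem.List.pyGetD ([1, 0, -1, 0] : List Int) d 0 = (pvRot (0, 1) d).2 := by
  interval_cases d <;> exact ⟨by decide, by decide⟩

-- the shape of A's step on each command
lemma pvStepA_L (x y d : Int) : pvStepA (x, y, d) 'L' = (x, y, PySem.Int.mod (d - 1) 4) := by
  simp [pvStepA]
lemma pvStepA_R (x y d : Int) : pvStepA (x, y, d) 'R' = (x, y, PySem.Int.mod (d + 1) 4) := by
  simp [pvStepA]
lemma pvStepA_F (x y d : Int) : pvStepA (x, y, d) 'F'
    = (x + PySem.List.pyGetD [0, 1, 0, -1] d 0, y + PySem.List.pyGetD [1, 0, -1, 0] d 0, d) := by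
  simp [pvStepA]
lemma pvStepA_other (x y d : Int) (c : Char) (hL : c ≠ 'L') (hR : c ≠ 'R') (hF : c ≠ 'F') :
    pvStepA (x, y, d) c = (x, y, d) := by
  simp [pvStepA, hL, hR, hF]

-- direction stays in 0..3 under A's step
lemma pvStepA_dir (s : Int × Int × Int) (c : Char) (h0 : 0 ≤ s.2.2) (h4 : s.2.2 < 4) :
    0 ≤ (pvStepA s c).2.2 ∧ (pvStepA s c).2.2 < 4 := by
  obtain ⟨x, y, d⟩ := s
  by_cases hL : c = 'L'
  · subst hL; rw [pvStepA_L]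
    exact ⟨PySem.Int.mod_nonneg _ (by norm_num), PySem.Int.mod_lt _ (by norm_num)⟩
  by_cases hR : c = 'R'
  · subst hR; rw [pvStepA_R]
    exact ⟨PySem.Int.mod_nonneg _ (by norm_num), PySem.Int.mod_lt _ (by norm_num)⟩
  by_cases hF : c = 'F'
  · subst hF; rw [pvStepA_F]; exact ⟨h0, h4⟩
  · rw [pvStepA_other _ _ _ _ hL hR hF]; exact ⟨h0, h4⟩

lemma pvRun_dir (cs : List Char) : ∀ s : Int × Int × Int, 0 ≤ s.2.2 → s.2.2 < 4 →
    0 ≤ (cs.foldl pvStepA s).2.2 ∧ (cs.foldl pvStepA s).2.2 < 4 := by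
  induction cs with
  | nil => intro s h0 h4; exact ⟨h0, h4⟩
  | cons c cs ih =>
    intro s h0 h4
    have := pvStepA_dir s c h0 h4
    exact ih _ this.1 this.2

-- advancing the state: B's step = A's step (for in-range direction)
lemma pvAdvB_eq (st : Int × Int × Int) (c : Char) (h0 : 0 ≤ st.2.2) (h4 : st.2.2 < 4) :
    pvAdvB st c = pvStepA st c := by
  obtain ⟨m1, m2⟩ := pvMove_eq st.2.2 h0 h4
  unfold pvAdvB pvStepA
  split_ifs <;> simp [m1, m2]

lemma pvAltB_eq (st : Int × Int × Int) (nc : Char) (hnc : nc = 'L' ∨ nc = 'R' ∨ nc = 'F')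
    (h0 : 0 ≤ st.2.2) (h4 : st.2.2 < 4) :
    pvAltB st nc = pvStepA st nc := by
  obtain ⟨m1, m2⟩ := pvMove_eq st.2.2 h0 h4
  rcases hnc with h | h | h <;> subst h <;> simp [pvAltB, pvStepA, m1, m2]

-- closed form for running a suffix: the final position is start + rotated suffix vector
lemma pvRun_eq (cs : List Char) : ∀ x y d : Int, 0 ≤ d → d < 4 →
    ((cs.foldl pvStepA (x, y, d)).1, (cs.foldl pvStepA (x, y, d)).2.1)
      = (x + (pvRot (pvV cs) d).1, y + (pvRot (pvV cs) d).2) := by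
  induction cs with
  | nil =>
    intro x y d h0 h4
    interval_cases d <;> norm_num [pvV, pvSuffix, pvRot, pvMod4_0, pvMod4_1, pvMod4_2, pvMod4_3]
  | cons c cs ih =>
    intro x y d h0 h4
    by_cases hL : c = 'L'
    · subst hL
      have hb : (0:Int) ≤ PySem.Int.mod (d - 1) 4 ∧ PySem.Int.mod (d - 1) 4 < 4 :=
        ⟨PySem.Int.mod_nonneg _ (by norm_num), PySem.Int.mod_lt _ (by norm_num)⟩
      rw [List.foldl_cons, pvStepA_L, ih x y _ hb.1 hb.2,
        show pvV ('L' :: cs) = (-(pvV cs).2, (pvV cs).1) by simp [pvV, pvSuffix],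
        ← pvRot_L (pvV cs) d h0 h4]
    by_cases hR : c = 'R'
    · subst hR
      have hb : (0:Int) ≤ PySem.Int.mod (d + 1) 4 ∧ PySem.Int.mod (d + 1) 4 < 4 :=
        ⟨PySem.Int.mod_nonneg _ (by norm_num), PySem.Int.mod_lt _ (by norm_num)⟩
      rw [List.foldl_cons, pvStepA_R, ih x y _ hb.1 hb.2,
        show pvV ('R' :: cs) = ((pvV cs).2, -(pvV cs).1) by simp [pvV, pvSuffix],
        ← pvRot_R (pvV cs) d h0 h4]
    by_cases hF : c = 'F'
    · subst hF
      obtain ⟨m1, m2⟩ := pvMove_eq d h0 h4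
      rw [List.foldl_cons, pvStepA_F, ih _ _ d h0 h4,
        show pvV ('F' :: cs) = ((pvV cs).1, (pvV cs).2 + 1) by simp [pvV, pvSuffix],
        pvRot_F (pvV cs) d h0 h4, m1, m2]
      simp only [Prod.mk.injEq]
      constructor <;> ring
    · rw [List.foldl_cons, pvStepA_other _ _ _ _ hL hR hF, ih x y d h0 h4,
        show pvV (c :: cs) = pvV cs by simp [pvV, pvSuffix, hL, hR, hF]]

-- A's prefix-positions list is the scan of pvStepA
def pvScan (s : Int × Int × Int) : List Char → List (Int × Int × Int)
  | [] => []
  | c :: cs => let s' := pvStepA s c; s' :: pvScan s' cs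

lemma pvCalc_aux (cs : List Char) : ∀ s acc,
    (cs.foldl (fun (st : (Int × Int × Int) × List (Int × Int × Int)) c =>
        let s' := pvStepA st.1 c; (s', st.2 ++ [s'])) (s, acc))
      = (cs.foldl pvStepA s, acc ++ pvScan s cs) := by
  induction cs with
  | nil => intro s acc; simp [pvScan]
  | cons c cs ih =>
    intro s acc
    simp only [List.foldl_cons, pvScan]
    rw [ih]
    simp

lemma pvCalc_eq (s : String) :
    calculate_positions s = (0, 0, 0) :: pvScan (0, 0, 0) s.toList := by
  unfold calculate_positions
  rw [pvCalc_aux]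
  rfl

lemma pvScan_get (cs : List Char) : ∀ (p : Nat) (s : Int × Int × Int), p ≤ cs.length →
    (s :: pvScan s cs).getD p (0, 0, 0) = (cs.take p).foldl pvStepA s := by
  induction cs with
  | nil =>
    intro p s hp
    obtain rfl : p = 0 := Nat.le_zero.mp hp
    simp
  | cons c cs ih =>
    intro p s hp
    cases p with
    | zero => simp
    | succ p =>
      simp only [pvScan, List.take_succ_cons, List.foldl_cons]
      exact ih p (pvStepA s c) (by simpa using hp)

-- the inner-step equality at one index
lemma pvInner_eq (cs : List Char) (p : Nat) (hp : p < cs.length)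
    (u : PySem.Set (Int × Int)) :
    (['L', 'R', 'F'] : List Char).foldl (fun u nc =>
      if PySem.List.pyGetD cs (p : Int) ' ' ≠ nc then
        let st := (cs.take p).foldl pvStepA (0, 0, 0)
        let st1 := pvStepA st nc
        let st2 := (cs.drop (p + 1)).foldl pvStepA st1
        PySem.Set.add u (st2.1, st2.2.1)
      else u) u
    = (['L', 'R', 'F'] : List Char).foldl (fun u nc =>
      if cs[p] ≠ nc then
        let a := pvAltB ((cs.take p).foldl pvStepA (0, 0, 0)) nc
        let f := pvRot (pvV (cs.drop (p + 1))) a.2.2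
        PySem.Set.add u (a.1 + f.1, a.2.1 + f.2)
      else u) u := by
  have hget : PySem.List.pyGetD cs (p : Int) ' ' = cs[p] := by
    rw [PySem.List.pyGetD_natCast]
    exact List.getD_eq_getElem cs ' ' hp
  have hdir := pvRun_dir (cs.take p) (0, 0, 0) (by norm_num) (by norm_num)
  set st := (cs.take p).foldl pvStepA (0, 0, 0) with hst
  have key : ∀ nc, nc = 'L' ∨ nc = 'R' ∨ nc = 'F' →
      (let st1 := pvStepA st nc
       let st2 := (cs.drop (p + 1)).foldl pvStepA st1
       ((st2.1, st2.2.1) : Int × Int))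
      = (let a := pvAltB st nc
         let f := pvRot (pvV (cs.drop (p + 1))) a.2.2
         (a.1 + f.1, a.2.1 + f.2)) := by
    intro nc hnc
    have h1 := pvStepA_dir st nc hdir.1 hdir.2
    have := pvRun_eq (cs.drop (p + 1)) (pvStepA st nc).1 (pvStepA st nc).2.1
      (pvStepA st nc).2.2 h1.1 h1.2
    rw [pvAltB_eq st nc hnc hdir.1 hdir.2]
    simp only [Prod.mk.injEq] at this ⊢
    constructor
    · simpa using this.1
    · simpa using this.2
  simp only [List.foldl_cons, List.foldl_nil, hget]
  rw [key 'L' (by tauto), key 'R' (by tauto), key 'F' (by tauto)]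

-- the outer loops agree
lemma pvOuter (cs : List Char) : ∀ (k p : Nat), p + k = cs.length →
    ∀ u : PySem.Set (Int × Int),
    (PySem.List.pyRange (p : Int) (cs.length : Int) 1).foldl (fun u i =>
      (['L', 'R', 'F'] : List Char).foldl (fun u nc =>
        if PySem.List.pyGetD cs i ' ' ≠ nc then
          let st := PySem.List.pyGetD ((0,0,0) :: pvScan (0,0,0) cs) i (0, 0, 0)
          let st1 := pvStepA st nc
          let st2 := (PySem.List.pyRange (i + 1) (cs.length : Int) 1).foldl
            (fun st j => pvStepA st (PySem.List.pyGetD cs j ' ')) st1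
          PySem.Set.add u (st2.1, st2.2.1)
        else u) u) u
    = pvLoopB (cs.drop p) (pvSuffix (cs.drop p))
        ((cs.take p).foldl pvStepA (0, 0, 0)) u := by
  intro k
  induction k with
  | zero =>
    intro p hp u
    rw [PySem.List.pyRange_one_eq_nil (by omega), List.drop_of_length_le (by omega)]
    rfl
  | succ k ih =>
    intro p hp u
    have hplt : p < cs.length := by omega
    -- peel index p off A's range
    rw [PySem.List.pyRange_one_cons (by exact_mod_cast hplt), List.foldl_cons]
    -- evaluate A's body at index p
    have hpre : PySem.List.pyGetD ((0,0,0) :: pvScan (0,0,0) cs) (p : Int) (0, 0, 0)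
        = (cs.take p).foldl pvStepA (0, 0, 0) := by
      rw [PySem.List.pyGetD_natCast]
      exact pvScan_get cs p (0, 0, 0) (by omega)
    have hsuf : ∀ st : Int × Int × Int,
        (PySem.List.pyRange ((p : Int) + 1) (cs.length : Int) 1).foldl
          (fun st j => pvStepA st (PySem.List.pyGetD cs j ' ')) st
        = (cs.drop (p + 1)).foldl pvStepA st := by
      intro st
      have := PySem.List.foldl_pyRange_pyGetD cs ' ' pvStepA st
        (a := (p : Int) + 1) (by positivity)
      simpa using this
    simp only [hpre, hsuf]
    rw [pvInner_eq cs p hplt u]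
    -- peel command p off B's loop
    rw [List.drop_eq_getElem_cons hplt]
    have hdir := pvRun_dir (cs.take p) (0, 0, 0) (by norm_num) (by norm_num)
    conv_rhs => rw [pvSuffix]
    rw [show pvLoopB (cs[p] :: cs.drop (p + 1))
          ((if cs[p] = 'L' then (-((pvSuffix (cs.drop (p+1))).headD (0,0)).2, ((pvSuffix (cs.drop (p+1))).headD (0,0)).1)
            else if cs[p] = 'R' then (((pvSuffix (cs.drop (p+1))).headD (0,0)).2, -((pvSuffix (cs.drop (p+1))).headD (0,0)).1)
            else if cs[p] = 'F' then (((pvSuffix (cs.drop (p+1))).headD (0,0)).1, ((pvSuffix (cs.drop (p+1))).headD (0,0)).2 + 1)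
            else (pvSuffix (cs.drop (p+1))).headD (0,0)) :: pvSuffix (cs.drop (p + 1)))
          ((cs.take p).foldl pvStepA (0, 0, 0)) u
        = pvLoopB (cs.drop (p + 1)) (pvSuffix (cs.drop (p + 1)))
            (pvAdvB ((cs.take p).foldl pvStepA (0, 0, 0)) cs[p])
            ((['L', 'R', 'F'] : List Char).foldl (fun u nc =>
              if cs[p] ≠ nc then
                let a := pvAltB ((cs.take p).foldl pvStepA (0, 0, 0)) nc
                let f := pvRot (pvV (cs.drop (p + 1))) a.2.2
                PySem.Set.add u (a.1 + f.1, a.2.1 + f.2)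
              else u) u)
        from rfl]
    rw [pvAdvB_eq _ _ hdir.1 hdir.2]
    have htake : cs.take (p + 1) = cs.take p ++ [cs[p]] := by
      rw [List.take_add_one, List.getElem?_eq_getElem hplt]
      rfl
    have hstep : (cs.take (p + 1)).foldl pvStepA ((0:Int), (0:Int), (0:Int))
        = pvStepA ((cs.take p).foldl pvStepA (0, 0, 0)) cs[p] := by
      rw [htake, List.foldl_append]
      rfl
    rw [← hstep]
    have h2 := ih (p + 1) (by omega)
      ((['L', 'R', 'F'] : List Char).foldl (fun u nc =>
        if cs[p] ≠ nc then
          let a := pvAltB ((cs.take p).foldl pvStepA (0, 0, 0)) nc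
          let f := pvRot (pvV (cs.drop (p + 1))) a.2.2
          PySem.Set.add u (a.1 + f.1, a.2.1 + f.2)
        else u) u)
    push_cast at h2
    exact h2

-- ===== VERDICT (by name: the statement is the Claim_ definition above) =====
theorem different_positions_spec : Claim_equal_different_positions := by
  intro s _
  unfold Spec_different_positions different_positions different_positions_alt
  simp only [pvCalc_eq]
  have h := pvOuter s.toList s.toList.length 0 (by omega) PySem.Set.empty
  simp only [Nat.cast_zero, List.drop_zero, List.take_zero, List.foldl_nil] at h
  rw [h]
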